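-- pv_equiv track=rewrite | github.com/kou-ming/NcuNetToolKit | Helper.py | count_line
-- ===== SOURCE A (Python) =====
-- def count_line(text, letter_num):
--     text_line = (text.count("\n") + 1)  # 計算換行符號的數量
--     count = 0
--     # 計算每超過幾個字就要加換行
--     for tx in text:
--         if tx == "\n":
--             count = 0
--             continue
--         count += 1
--         if count == letter_num:
--             text_line += 1
--             count = 0
--     return text_line
-- ===== SOURCE B (Python) =====
-- def count_line(text, letter_num):
--     segments = text.split("\n")
--     if letter_num <= 0:
--         return len(segments)
--     return len(segments) + sum(len(seg) // letter_num for seg in segments)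
-- ===== Notes on version B (the rewrite author's own statement) =====
-- stated objective: simpler
-- what changed: Replaces the per-character wrap-counter loop with a split on '\n' plus a closed-form floor division per segment (forced wraps = len(segment) // letter_num, none when letter_num <= 0), summed in one comprehension.
import Mathlib
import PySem

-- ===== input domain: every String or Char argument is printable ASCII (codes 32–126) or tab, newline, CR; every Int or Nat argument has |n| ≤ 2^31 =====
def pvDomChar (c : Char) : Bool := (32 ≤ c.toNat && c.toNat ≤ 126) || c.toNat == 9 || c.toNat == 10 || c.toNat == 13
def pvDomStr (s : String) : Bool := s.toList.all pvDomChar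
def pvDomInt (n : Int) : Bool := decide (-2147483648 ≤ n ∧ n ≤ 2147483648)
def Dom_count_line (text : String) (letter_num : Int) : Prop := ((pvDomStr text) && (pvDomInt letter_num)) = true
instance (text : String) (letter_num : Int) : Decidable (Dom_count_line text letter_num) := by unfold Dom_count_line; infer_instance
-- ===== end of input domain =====

-- B replaces A's per-character wrap counter with split-on-'\n' plus a closed-form
-- floor division per segment (objective: simpler).

-- ===== PORT A =====
def count_line (text : String) (letter_num : Int) : Int :=
  let init : Int × Int := ((PySem.Str.count text "\n" : Int) + 1, 0)
  (text.toList.foldl (fun st tx =>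
      if tx == '\n' then (st.1, 0)
      else
        let count := st.2 + 1
        if count == letter_num then (st.1 + 1, 0) else (st.1, count)) init).1

-- ===== PORT B =====
def count_line_alt (text : String) (letter_num : Int) : Int :=
  let segments := PySem.Chars.splitOn text.toList "\n".toList
  if letter_num ≤ 0 then (segments.length : Int)
  else (segments.length : Int)
    + (segments.map (fun seg => PySem.Int.floordiv (seg.length : Int) letter_num)).sum

-- ===== PRECONDITION & SPEC =====
def Spec_count_line (text : String) (letter_num : Int) (out : Int) : Prop := out = count_line_alt text letter_num
instance (text : String) (letter_num : Int) (out : Int) : Decidable (Spec_count_line text letter_num out) := by unfold Spec_count_line; infer_instance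

-- ===== CLAIM (what is proved, stated in full; the proofs are below) =====
def Claim_equal_count_line : Prop := ∀ (text : String) (letter_num : Int), Dom_count_line text letter_num → Spec_count_line text letter_num (count_line text letter_num)

-- ===== LEMMAS AND PROOFS =====

/-- Structural split of a char list at a separator char: first segment and the rest. -/
def pvSeg (ch : Char) : List Char → List Char × List (List Char)
  | [] => ([], [])
  | c :: rest =>
    let p := pvSeg ch rest
    if c = ch then ([], p.1 :: p.2) else (c :: p.1, p.2)

theorem pvSeg_count (ch : Char) (l : List Char) :
    (pvSeg ch l).2.length = l.count ch := by
  induction l with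
  | nil => simp [pvSeg]
  | cons c rest ih =>
    by_cases h : c = ch <;> simp [pvSeg, h, ih]

theorem splitOn_go_eq (ch : Char) :
    ∀ (fuel : Nat) (l cur : List Char) (acc : List (List Char)), l.length ≤ fuel →
      PySem.Chars.splitOn.go [ch] fuel l cur acc
        = acc.reverse ++ (cur.reverse ++ (pvSeg ch l).1) :: (pvSeg ch l).2 := by
  intro fuel
  induction fuel with
  | zero =>
    intro l cur acc h
    have : l = [] := List.length_eq_zero_iff.mp (Nat.le_zero.mp h)
    subst this
    simp [PySem.Chars.splitOn.go, pvSeg]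
  | succ n ih =>
    intro l cur acc h
    cases l with
    | nil => simp [PySem.Chars.splitOn.go, pvSeg]
    | cons c rest =>
      by_cases hc : c = ch
      · subst hc
        have : [c].isPrefixOf (c :: rest) = true := by simp [List.isPrefixOf]
        simp only [PySem.Chars.splitOn.go, this, if_pos, List.length_cons, List.length_nil,
          List.drop_succ_cons, List.drop_zero]
        rw [ih rest [] (cur.reverse :: acc) (by simpa using Nat.le_of_succ_le_succ h)]
        simp [pvSeg]
      · have : [ch].isPrefixOf (c :: rest) = false := by
          simp [List.isPrefixOf, (Ne.symm hc)]
        simp only [PySem.Chars.splitOn.go]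
        rw [if_neg (by simp [this])]
        rw [ih rest (c :: cur) acc (by simpa using Nat.le_of_succ_le_succ h)]
        simp [pvSeg, hc]

theorem splitOn_eq_pvSeg (ch : Char) (l : List Char) :
    PySem.Chars.splitOn l [ch] = (pvSeg ch l).1 :: (pvSeg ch l).2 := by
  unfold PySem.Chars.splitOn
  rw [splitOn_go_eq ch (l.length + 1) l [] [] (by omega)]
  simp

theorem count_go_eq (ch : Char) :
    ∀ (fuel : Nat) (l : List Char) (acc : Nat), l.length ≤ fuel →
      PySem.Chars.count.go [ch] fuel l acc = acc + l.count ch := by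
  intro fuel
  induction fuel with
  | zero =>
    intro l acc h
    have : l = [] := List.length_eq_zero_iff.mp (Nat.le_zero.mp h)
    subst this
    simp [PySem.Chars.count.go]
  | succ n ih =>
    intro l acc h
    cases l with
    | nil => simp [PySem.Chars.count.go]
    | cons c rest =>
      by_cases hc : c = ch
      · subst hc
        have hp : [c].isPrefixOf (c :: rest) = true := by simp [List.isPrefixOf]
        simp only [PySem.Chars.count.go, hp, if_pos, List.length_cons, List.length_nil,
          List.drop_succ_cons, List.drop_zero]
        rw [ih rest (acc + 1) (by simpa using Nat.le_of_succ_le_succ h)]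
        simp
        omega
      · have hp : [ch].isPrefixOf (c :: rest) = false := by
          simp [List.isPrefixOf, (Ne.symm hc)]
        simp only [PySem.Chars.count.go]
        rw [if_neg (by simp [hp])]
        rw [ih rest acc (by simpa using Nat.le_of_succ_le_succ h)]
        simp [hc]

theorem chars_count_single (ch : Char) (l : List Char) :
    PySem.Chars.count l [ch] = l.count ch := by
  unfold PySem.Chars.count
  rw [if_neg (by simp)]
  simpa using count_go_eq ch l.length l 0 (le_refl _)

/-- A's loop never wraps for letter_num ≤ 0. -/
theorem loopA_nonpos (L : Int) (hL : L ≤ 0) :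
    ∀ (cs : List Char) (tl c : Int), 0 ≤ c →
      (cs.foldl (fun st tx =>
        if tx == '\n' then (st.1, 0)
        else
          let count := st.2 + 1
          if count == L then (st.1 + 1, 0) else (st.1, count)) (tl, c)).1 = tl := by
  intro cs
  induction cs with
  | nil => intro tl c hc; simp
  | cons x rest ih =>
    intro tl c hc
    by_cases hx : x = '\n'
    · simp only [List.foldl_cons, hx, beq_self_eq_true, if_pos]
      simpa using ih tl 0 le_rfl
    · have hne : (c + 1 == L) = false := by
        simp only [beq_eq_false_iff_ne]; omega
      simp only [List.foldl_cons]
      rw [if_neg (by simp [hx]), if_neg (by simpa using hne)]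
      simpa using ih tl (c + 1) (by omega)

/-- A's loop for positive letter_num: wraps per segment are floor divisions. -/
theorem loopA_pos (L : Int) (hL : 0 < L) :
    ∀ (cs : List Char) (tl c : Int), 0 ≤ c → c < L →
      (cs.foldl (fun st tx =>
        if tx == '\n' then (st.1, 0)
        else
          let count := st.2 + 1
          if count == L then (st.1 + 1, 0) else (st.1, count)) (tl, c)).1
      = tl + (((c.toNat + (pvSeg '\n' cs).1.length) / L.toNat : Nat) : Int)
          + ((pvSeg '\n' cs).2.map (fun s => ((s.length / L.toNat : Nat) : Int))).sum := by
  intro cs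
  induction cs with
  | nil =>
    intro tl c h0 hc
    have : c.toNat / L.toNat = 0 := Nat.div_eq_of_lt (by omega)
    simp [pvSeg, this]
  | cons x rest ih =>
    intro tl c h0 hc
    by_cases hx : x = '\n'
    · simp only [List.foldl_cons, hx, beq_self_eq_true, if_pos]
      rw [ih tl 0 le_rfl hL]
      have hcz : c.toNat / L.toNat = 0 := Nat.div_eq_of_lt (by omega)
      simp only [pvSeg, if_true, List.length_nil, hcz, Nat.cast_zero,
        add_zero, List.map_cons, List.sum_cons, Int.toNat_zero, Nat.zero_add]
      ring
    · by_cases hw : c + 1 = L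
      · simp only [List.foldl_cons]
        rw [if_neg (by simp [hx]), if_pos (by simpa using hw)]
        rw [ih (tl + 1) 0 le_rfl hL]
        have hseg : pvSeg '\n' (x :: rest) = (x :: (pvSeg '\n' rest).1, (pvSeg '\n' rest).2) := by
          simp [pvSeg, hx]
        rw [hseg]
        have hLn : c.toNat + 1 = L.toNat := by omega
        have : (c.toNat + (x :: (pvSeg '\n' rest).1).length) / L.toNat
            = 1 + (pvSeg '\n' rest).1.length / L.toNat := by
          simp only [List.length_cons]
          have : c.toNat + ((pvSeg '\n' rest).1.length + 1)
              = L.toNat + (pvSeg '\n' rest).1.length := by omega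
          rw [this, Nat.add_div_left _ (by omega)]
          omega
        rw [this]
        push_cast
        ring
      · simp only [List.foldl_cons]
        rw [if_neg (by simp [hx]), if_neg (by simpa using hw)]
        rw [ih tl (c + 1) (by omega) (by omega)]
        have hseg : pvSeg '\n' (x :: rest) = (x :: (pvSeg '\n' rest).1, (pvSeg '\n' rest).2) := by
          simp [pvSeg, hx]
        rw [hseg]
        have : (c + 1).toNat + (pvSeg '\n' rest).1.length
            = c.toNat + (x :: (pvSeg '\n' rest).1).length := by
          simp only [List.length_cons]; omega
        rw [this]

theorem floordiv_natCast (n : Nat) (L : Int) (hL : 0 < L) :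
    PySem.Int.floordiv (n : Int) L = ((n / L.toNat : Nat) : Int) := by
  unfold PySem.Int.floordiv
  rw [Int.fdiv_eq_ediv, if_pos (Or.inl hL.le), sub_zero]
  rw [← Int.toNat_of_nonneg hL.le]
  exact (Int.natCast_div n L.toNat).symm

-- ===== VERDICT (by name: the statement is the Claim_ definition above) =====
theorem count_line_spec : Claim_equal_count_line := by
  intro text L _
  unfold Spec_count_line count_line count_line_alt
  have hsep : ("\n".toList : List Char) = ['\n'] := rfl
  rw [hsep, splitOn_eq_pvSeg]
  have hcnt : PySem.Str.count text "\n" = (pvSeg '\n' text.toList).2.length := by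
    unfold PySem.Str.count
    rw [hsep, chars_count_single, pvSeg_count]
  by_cases hL : L ≤ 0
  · rw [if_pos hL]
    simp only [loopA_nonpos L hL text.toList _ 0 le_rfl, hcnt, List.length_cons]
    push_cast
    ring
  · replace hL : 0 < L := by omega
    rw [if_neg (by omega)]
    rw [loopA_pos L hL text.toList _ 0 le_rfl hL, hcnt]
    simp only [List.map_cons, List.sum_cons, floordiv_natCast _ L hL, List.length_cons,
      Int.toNat_zero, Nat.zero_add]
    push_cast
    ring
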